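-- pv_equiv track=rewrite | github.com/CBProgramming/sun-temple-game | sun_temple_game.py | update_gem_collection
-- ===== SOURCE A (Python) =====
-- def update_gem_collection(old_space, new_space, game_board,
--                           player_gems, player_name):
--     game_board[old_space] = " "
--     gem_collector = old_space + 1
--     while gem_collector <= new_space:
--         current_gem = game_board[gem_collector]
--         player_gems[player_name][current_gem] += 1
--         game_board[gem_collector] = " "
--         gem_collector = gem_collector + 1
--     game_board[new_space] = "*"
--     return player_gems, game_board
-- ===== SOURCE B (Python) =====
-- def update_gem_collection(old_space, new_space, game_board,
--                           player_gems, player_name):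
--     game_board[old_space] = " "
--     lo = old_space + 1
--     segment = game_board[lo:new_space + 1]
--     if segment:
--         inventory = player_gems[player_name]
--         for gem in inventory:
--             inventory[gem] += segment.count(gem)
--     game_board[lo:new_space + 1] = [" "] * len(segment)
--     game_board[new_space] = "*"
--     return player_gems, game_board
-- ===== Notes on version B (the rewrite author's own statement) =====
-- stated objective: alternative
-- what changed: Instead of A's index-walking while-loop that bumps one tally per traversed board cell, B iterates over the player's inventory KEYS and adds segment.count(gem) per key (the loop runs over the gem inventory, not over the board cells), and blanks the traversed range with one slice assignment.
import Mathlib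
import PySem

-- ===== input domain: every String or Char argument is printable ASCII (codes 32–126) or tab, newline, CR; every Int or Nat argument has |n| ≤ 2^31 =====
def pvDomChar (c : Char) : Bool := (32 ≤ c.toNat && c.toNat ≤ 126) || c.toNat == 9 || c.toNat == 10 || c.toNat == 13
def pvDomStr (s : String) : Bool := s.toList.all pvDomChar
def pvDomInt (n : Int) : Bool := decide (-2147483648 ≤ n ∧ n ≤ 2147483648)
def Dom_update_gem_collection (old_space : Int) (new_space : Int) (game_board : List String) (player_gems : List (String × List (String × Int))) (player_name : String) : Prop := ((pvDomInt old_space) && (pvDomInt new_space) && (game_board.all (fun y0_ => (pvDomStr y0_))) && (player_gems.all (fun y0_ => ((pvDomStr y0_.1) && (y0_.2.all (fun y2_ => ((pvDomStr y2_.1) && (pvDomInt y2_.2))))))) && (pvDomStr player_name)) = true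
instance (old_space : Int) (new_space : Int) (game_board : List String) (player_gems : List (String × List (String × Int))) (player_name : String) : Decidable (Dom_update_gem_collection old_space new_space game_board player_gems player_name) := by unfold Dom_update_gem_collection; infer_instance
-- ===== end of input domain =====

-- B replaces A's cell-by-cell while-walk over the board (one tally bump per traversed cell)
-- with a loop over the player's inventory KEYS, adding segment.count(gem) per key, and blanks
-- the traversed range with one slice assignment; objective: alternative (same order of cost).
-- Both Pythons mutate game_board and player_gems in place; the theorems are about the
-- returned pair.

-- ===== PORT A =====
-- one iteration of A's while loop: current_gem = game_board[gem_collector]; then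
-- player_gems[player_name][current_gem] += 1 (read-then-write rendered with the total
-- getD/modify forms — exact when both keys exist, which Pre_ guarantees); then blank the cell.
def ugcStepA (player_name : String)
    (s : List String × PySem.Dict String (List (String × Int))) (i : Int) :
    List String × PySem.Dict String (List (String × Int)) :=
  let current_gem := PySem.List.pyGetD s.1 i " "
  let pg := s.2.modify player_name []
    (fun inner => ((PySem.Dict.mk inner).modify current_gem 0 (· + 1)).items)
  (PySem.List.pySetD s.1 i " ", pg)

def update_gem_collection (old_space : Int) (new_space : Int) (game_board : List String) (player_gems : List (String × List (String × Int))) (player_name : String) : (List (String × List (String × Int))) × List String :=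
  -- game_board[old_space] = " "   (pySetD: total form, exact for an in-range index — Pre_)
  let gb0 := PySem.List.pySetD game_board old_space " "
  -- while gem_collector <= new_space: … ; gem_collector += 1   — the counter walks exactly the
  -- indices old_space+1 .. new_space, i.e. range(old_space+1, new_space+1)
  let st := (PySem.List.pyRange (old_space + 1) (new_space + 1) 1).foldl
    (ugcStepA player_name) (gb0, PySem.Dict.mk player_gems)
  -- game_board[new_space] = "*"
  ((st.2).items, PySem.List.pySetD st.1 new_space "*")

-- ===== PORT B =====
def update_gem_collection_alt (old_space : Int) (new_space : Int) (game_board : List String) (player_gems : List (String × List (String × Int))) (player_name : String) : (List (String × List (String × Int))) × List String :=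
  -- game_board[old_space] = " "
  let gb0 := PySem.List.pySetD game_board old_space " "
  -- lo = old_space + 1; segment = game_board[lo : new_space+1]
  let lo := old_space + 1
  let segment := PySem.List.slice gb0 (some lo) (some (new_space + 1))
  -- if segment: inventory = player_gems[player_name]
  --             for gem in inventory: inventory[gem] += segment.count(gem)
  -- (iterate over the inventory's keys; in-place value update → modify; the read-then-write
  -- rendered with getD/modify — exact since the iterated keys are the dict's own keys)
  let pg1 :=
    if segment.isEmpty then PySem.Dict.mk player_gems
    else
      let inv0 : PySem.Dict String Int :=
        PySem.Dict.mk ((PySem.Dict.mk player_gems).getD player_name [])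
      let inv1 := inv0.keys.foldl
        (fun (D : PySem.Dict String Int) g =>
          D.modify g 0 (· + (segment.count g : Int))) inv0
      (PySem.Dict.mk player_gems).insert player_name inv1.items
  -- game_board[lo : new_space+1] = [" "] * len(segment)   (Python slice assignment, exact for
  -- every int bound: prefix up to the clamped start, replacement, suffix from the max of the
  -- two clamped bounds)
  let gb1 := gb0.take (PySem.List.clampIdx gb0.length lo)
      ++ List.replicate segment.length " "
      ++ gb0.drop (max (PySem.List.clampIdx gb0.length (new_space + 1))
                       (PySem.List.clampIdx gb0.length lo))
  (pg1.items, PySem.List.pySetD gb1 new_space "*")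

-- ===== PRECONDITION & SPEC =====
-- Pre_ excludes inputs where A raises (out-of-range board index → IndexError; player_name or a
-- traversed gem missing from its dict → KeyError), plus two corners on which A still returns:
-- indices at or below -2, where Python's wraparound makes A's index walk and B's slice traverse
-- different cells, and association lists with duplicate keys, which represent no Python dict.
def Pre_update_gem_collection (old_space : Int) (new_space : Int) (game_board : List String) (player_gems : List (String × List (String × Int))) (player_name : String) : Prop :=
  game_board ≠ [] ∧
  -1 ≤ old_space ∧ old_space < game_board.length ∧
  -1 ≤ new_space ∧ new_space < game_board.length ∧
  (player_gems.map Prod.fst).Nodup ∧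
  (((PySem.Dict.mk player_gems).getD player_name []).map Prod.fst).Nodup ∧
  (old_space < new_space →
    player_name ∈ player_gems.map Prod.fst ∧
    ∀ g ∈ ((PySem.List.pySetD game_board old_space " ").drop
          (old_space + 1).toNat).take ((new_space - old_space).toNat),
      g ∈ ((PySem.Dict.mk player_gems).getD player_name []).map Prod.fst)

instance (old_space : Int) (new_space : Int) (game_board : List String) (player_gems : List (String × List (String × Int))) (player_name : String) : Decidable (Pre_update_gem_collection old_space new_space game_board player_gems player_name) := by unfold Pre_update_gem_collection; infer_instance

def pvWitness_update_gem_collection : Int × Int × List String × (List (String × List (String × Int))) × String :=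
  (0, 2, ["R", "G", "B"], [("p", [("R", 1), ("G", 0), ("B", 0)])], "p")

def Spec_update_gem_collection (old_space : Int) (new_space : Int) (game_board : List String) (player_gems : List (String × List (String × Int))) (player_name : String) (out : (List (String × List (String × Int))) × List String) : Prop := out = update_gem_collection_alt old_space new_space game_board player_gems player_name
instance (old_space : Int) (new_space : Int) (game_board : List String) (player_gems : List (String × List (String × Int))) (player_name : String) (out : (List (String × List (String × Int))) × List String) : Decidable (Spec_update_gem_collection old_space new_space game_board player_gems player_name out) := by unfold Spec_update_gem_collection; infer_instance

-- ===== CLAIM (what is proved, stated in full; the proofs are below) =====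
def Claim_equal_update_gem_collection : Prop := ∀ (old_space : Int) (new_space : Int) (game_board : List String) (player_gems : List (String × List (String × Int))) (player_name : String), Dom_update_gem_collection old_space new_space game_board player_gems player_name → Pre_update_gem_collection old_space new_space game_board player_gems player_name → Spec_update_gem_collection old_space new_space game_board player_gems player_name (update_gem_collection old_space new_space game_board player_gems player_name)

-- ===== LEMMAS AND PROOFS =====

-- re-inserting a key's current value at an existing key is a no-op (keys unique)
theorem ugc_insert_getD_self {d : PySem.Dict String (List (String × Int))} {k : String}
    (hc : d.contains k = true) (hnd : d.keys.Nodup) :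
    d.insert k (d.getD k []) = d := by
  apply PySem.Dict.ext
  rw [PySem.Dict.items_insert_of_contains d _ hc]
  conv_rhs => rw [← List.map_id d.items]
  apply List.map_congr_left
  intro p hp
  rcases p with ⟨p1, p2⟩
  by_cases h : p1 = k
  · have hv : d.getD k [] = p2 :=
      PySem.Dict.getD_of_mem_items d (k := k) (v := p2) (by rw [← h]; exact hp) hnd []
    simp [h, hv]
  · simp [h]

-- A's while loop over a board decomposed as pre ++ seg ++ suf, walking exactly seg's indices:
-- it blanks seg on the board and folds the per-gem bump over seg's gems
theorem ugc_loopA (name : String) (seg : List String) :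
    ∀ (pre suf : List String) (d : PySem.Dict String (List (String × Int))),
    (PySem.List.pyRange (pre.length : Int) ((pre.length : Int) + seg.length) 1).foldl
        (ugcStepA name) (pre ++ seg ++ suf, d)
    = (pre ++ List.replicate seg.length " " ++ suf,
       seg.foldl (fun d g => d.modify name []
         (fun inner => ((PySem.Dict.mk inner).modify g 0 (· + 1)).items)) d) := by
  induction seg with
  | nil =>
    intro pre suf d
    rw [PySem.List.pyRange_one_eq_nil (by simp)]
    simp
  | cons g rest ih =>
    intro pre suf d
    rw [PySem.List.pyRange_one_cons (by simp only [List.length_cons]; push_cast; omega)]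
    simp only [List.foldl_cons]
    have hstep : ugcStepA name (pre ++ (g :: rest) ++ suf, d) (pre.length : Int)
        = ((pre ++ [" "]) ++ rest ++ suf,
           d.modify name [] (fun inner => ((PySem.Dict.mk inner).modify g 0 (· + 1)).items)) := by
      have hget : PySem.List.pyGetD (pre ++ (g :: rest) ++ suf) (pre.length : Int) " " = g := by
        rw [List.append_assoc]
        simp [PySem.List.pyGetD]
      have hset : PySem.List.pySetD (pre ++ (g :: rest) ++ suf) (pre.length : Int) " "
          = (pre ++ [" "]) ++ rest ++ suf := by
        rw [PySem.List.pySetD_natCast]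
        rw [List.append_assoc, List.set_append_right _ _ (le_refl _)]
        simp [List.append_assoc]
      simp only [ugcStepA]
      rw [hget, hset]
    rw [hstep]
    have h1 : (pre.length : Int) + 1 = ((pre ++ [" "]).length : Int) := by simp
    have h2 : (pre.length : Int) + ((g :: rest).length : Int)
        = ((pre ++ [" "]).length : Int) + rest.length := by simp; omega
    rw [h2, h1, ih (pre ++ [" "]) suf]
    simp [List.replicate_succ, List.append_assoc]

-- repeated modify at the SAME outer key composes: a whole loop of per-element inner updates
-- is one insert of the inner-dict fold's result (used for A's gem walk)
theorem ugc_foldl_modify_outer {β : Type} (name : String) (l : List β)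
    (F : β → PySem.Dict String Int → PySem.Dict String Int) :
    ∀ (d : PySem.Dict String (List (String × Int))),
    d.contains name = true → d.keys.Nodup →
    l.foldl (fun d x => d.modify name []
        (fun inner => (F x (PySem.Dict.mk inner)).items)) d
    = d.insert name ((l.foldl (fun D x => F x D)
        (PySem.Dict.mk (d.getD name []))).items) := by
  induction l with
  | nil =>
    intro d hc hnd
    simp only [List.foldl_nil]
    exact (ugc_insert_getD_self hc hnd).symm
  | cons x rest ih =>
    intro d hc hnd
    simp only [List.foldl_cons]
    rw [show d.modify name [] (fun inner => (F x (PySem.Dict.mk inner)).items)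
        = d.insert name ((F x (PySem.Dict.mk (d.getD name []))).items) from rfl]
    rw [ih _ (PySem.Dict.contains_insert_self d _ _) (PySem.Dict.nodup_keys_insert d _ _ hnd)]
    rw [PySem.Dict.insert_insert_self]
    rw [PySem.Dict.getD_insert_self]

theorem ugc_set_update_of_subset (l : List String) :
    ∀ (s : List String), (∀ x ∈ l, x ∈ s) → PySem.Set.update s l = s := by
  induction l with
  | nil => intro s _; rfl
  | cons x rest ih =>
    intro s h
    show PySem.Set.update (PySem.Set.add s x) rest = s
    have hx : PySem.Set.add s x = s := by
      simp [PySem.Set.add, PySem.Set.contains, h x (by simp)]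
    rw [hx]
    exact ih s (fun y hy => h y (by simp [hy]))

-- B's key loop: folding "add seg.count g at key g" over a NODUP key list touches v once or never
theorem ugc_keys_fold_getD (seg : List String) (l : List String) :
    ∀ (D : PySem.Dict String Int) (v : String), l.Nodup →
    (l.foldl (fun D g => D.modify g 0 (· + (seg.count g : Int))) D).getD v 0
    = if v ∈ l then D.getD v 0 + seg.count v else D.getD v 0 := by
  induction l with
  | nil => intro D v _; simp
  | cons g rest ih =>
    intro D v hnd
    simp only [List.foldl_cons]
    rw [ih _ v hnd.of_cons]
    by_cases hv : v ∈ rest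
    · have hne : v ≠ g := by rintro rfl; exact (List.nodup_cons.mp hnd).1 hv
      simp [hv, PySem.Dict.getD_modify, hne]
    · by_cases hg : v = g
      · subst hg
        simp [hv, PySem.Dict.getD_modify_self]
      · simp [hv, hg, PySem.Dict.getD_modify]

-- the heart of the equivalence: bumping the tally once per traversed gem equals adding
-- seg.count(gem) once per inventory key, when every traversed gem is already a key
theorem ugc_inner_eq (seg : List String) (inn : PySem.Dict String Int)
    (hnd : inn.keys.Nodup) (hcov : ∀ g ∈ seg, g ∈ inn.keys) :
    seg.foldl (fun D g => D.modify g 0 (· + 1)) inn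
    = inn.keys.foldl (fun D g => D.modify g 0 (· + (seg.count g : Int))) inn := by
  have hkL : (seg.foldl (fun D g => D.modify g 0 (· + 1)) inn).keys = inn.keys := by
    rw [PySem.Dict.keys_foldl_modify seg 0 (fun _ _ => (· + 1)) inn]
    exact ugc_set_update_of_subset seg inn.keys hcov
  have hkR : (inn.keys.foldl (fun D g => D.modify g 0 (· + (seg.count g : Int))) inn).keys
      = inn.keys := by
    rw [PySem.Dict.keys_foldl_modify inn.keys 0 (fun _ g => (· + (seg.count g : Int))) inn]
    exact ugc_set_update_of_subset inn.keys inn.keys (fun x hx => hx)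
  apply PySem.Dict.ext
  rw [PySem.Dict.items_eq_map_keys _ (by rw [hkL]; exact hnd) 0,
      PySem.Dict.items_eq_map_keys _ (by rw [hkR]; exact hnd) 0, hkL, hkR]
  apply List.map_congr_left
  intro v hv
  rw [PySem.Dict.getD_foldl_modify_add_one, ugc_keys_fold_getD seg inn.keys inn v hnd,
      if_pos hv]

theorem ugc_main (old_space : Int) (new_space : Int) (game_board : List String)
    (player_gems : List (String × List (String × Int))) (player_name : String)
    (hne : game_board ≠ [])
    (h0 : -1 ≤ old_space) (h1 : old_space < game_board.length)
    (h2 : -1 ≤ new_space) (h3 : new_space < game_board.length)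
    (hndO : (player_gems.map Prod.fst).Nodup)
    (hndI : (((PySem.Dict.mk player_gems).getD player_name []).map Prod.fst).Nodup)
    (himp : old_space < new_space →
      player_name ∈ player_gems.map Prod.fst ∧
      ∀ g ∈ ((PySem.List.pySetD game_board old_space " ").drop
          (old_space + 1).toNat).take ((new_space - old_space).toNat),
        g ∈ ((PySem.Dict.mk player_gems).getD player_name []).map Prod.fst) :
    update_gem_collection old_space new_space game_board player_gems player_name
    = update_gem_collection_alt old_space new_space game_board player_gems player_name := by
  have hlenpos : 0 < game_board.length := by
    cases game_board with
    | nil => exact absurd rfl hne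
    | cons x xs => simp
  obtain ⟨a, ha⟩ : ∃ a : Nat, old_space + 1 = (a : Int) :=
    ⟨(old_space + 1).toNat, by omega⟩
  set pg0 : PySem.Dict String (List (String × Int)) := PySem.Dict.mk player_gems with hpg0
  have hndK : pg0.keys.Nodup := by rw [hpg0, PySem.Dict.keys_mk]; exact hndO
  set gb0 := PySem.List.pySetD game_board old_space " " with hgb0
  have hlen0 : gb0.length = game_board.length := PySem.List.length_pySetD _ _ _
  have haLen : a ≤ game_board.length := by omega
  have hclampA : PySem.List.clampIdx gb0.length (old_space + 1) = a := by
    rw [ha, PySem.List.clampIdx_natCast, hlen0]; omega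
  by_cases hkm : new_space ≤ old_space
  · -- backward or null move: the loop body never runs, the segment is empty
    have hrange : PySem.List.pyRange (old_space + 1) (new_space + 1) 1 = [] :=
      PySem.List.pyRange_one_eq_nil (by omega)
    have hsegnil : PySem.List.slice gb0 (some (old_space + 1)) (some (new_space + 1)) = [] := by
      rw [PySem.List.slice_toNat gb0 (a := old_space + 1) (b := new_space + 1)
        (by omega) (by omega)]
      have : (new_space + 1).toNat - (old_space + 1).toNat = 0 := by omega
      rw [this, List.take_zero]
    have hclampB : PySem.List.clampIdx gb0.length (new_space + 1) ≤ a := by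
      obtain ⟨b, hb⟩ : ∃ b : Nat, new_space + 1 = (b : Int) := ⟨(new_space + 1).toNat, by omega⟩
      rw [hb, PySem.List.clampIdx_natCast]; omega
    simp only [update_gem_collection, update_gem_collection_alt]
    rw [← hgb0, hrange, hsegnil]
    simp only [List.foldl_nil, List.length_nil, List.replicate_zero, List.append_nil,
      List.isEmpty_nil, if_pos]
    rw [hclampA, max_eq_right hclampB, List.take_append_drop]
  · -- forward move
    obtain ⟨m, rfl⟩ : ∃ m : Nat, new_space = (m : Int) := ⟨new_space.toNat, by omega⟩
    obtain ⟨hmem, hcov⟩ := himp (by omega)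
    have hcont : pg0.contains player_name = true := by
      rw [PySem.Dict.contains_iff_mem_keys, hpg0, PySem.Dict.keys_mk]; exact hmem
    have ham : a ≤ m := by omega
    have hm : m < game_board.length := by exact_mod_cast h3
    set pre := gb0.take a with hpre
    set seg := (gb0.drop a).take (m + 1 - a) with hseg
    set suf := gb0.drop (m + 1) with hsuf
    have hplen : pre.length = a := by
      simp [hpre, hlen0]; omega
    have hslen : seg.length = m + 1 - a := by
      simp [hseg, hlen0]; omega
    have hdecomp : gb0 = pre ++ seg ++ suf := by
      rw [hpre, hseg, hsuf, List.append_assoc]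
      conv_lhs => rw [← List.take_append_drop a gb0]
      congr 1
      conv_lhs => rw [← List.take_append_drop (m + 1 - a) (gb0.drop a)]
      congr 1
      rw [List.drop_drop]
      congr 1
      omega
    have hsegslice : PySem.List.slice gb0 (some (old_space + 1)) (some ((m : Int) + 1)) = seg := by
      rw [PySem.List.slice_toNat gb0 (a := old_space + 1) (b := (m : Int) + 1)
        (by omega) (by omega), ha, hseg]
      congr 1
    have hsegne : seg.isEmpty = false := by
      rw [List.isEmpty_eq_false_iff, ← List.length_pos_iff, hslen]; omega
    have hcov' : ∀ g ∈ seg, g ∈ (PySem.Dict.mk (pg0.getD player_name [])).keys := by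
      intro g hg
      rw [PySem.Dict.keys_mk]
      apply hcov
      have h1 : (old_space + 1).toNat = a := by omega
      have h2 : ((m : Int) - old_space).toNat = m + 1 - a := by omega
      rw [h1, h2]
      exact hg
    have hndI' : (PySem.Dict.mk (pg0.getD player_name [])).keys.Nodup := by
      rw [PySem.Dict.keys_mk]; exact hndI
    have hrange : PySem.List.pyRange (old_space + 1) ((m : Int) + 1) 1
        = PySem.List.pyRange (pre.length : Int) ((pre.length : Int) + seg.length) 1 := by
      rw [hplen, hslen, ha]; congr 1; omega
    have hclampB : PySem.List.clampIdx gb0.length ((m : Int) + 1) = m + 1 := by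
      have : (m : Int) + 1 = ((m + 1 : Nat) : Int) := by push_cast; ring
      rw [this, PySem.List.clampIdx_natCast, hlen0]; omega
    simp only [update_gem_collection, update_gem_collection_alt]
    rw [← hgb0, hrange]
    conv_lhs => rw [hdecomp]
    rw [ugc_loopA player_name seg pre suf pg0]
    rw [ugc_foldl_modify_outer player_name seg (fun g D => D.modify g 0 (· + 1)) pg0 hcont hndK]
    rw [hsegslice, hsegne]
    simp only [Bool.false_eq_true, if_false]
    rw [← ugc_inner_eq seg (PySem.Dict.mk (pg0.getD player_name [])) hndI' hcov']
    rw [hclampA, hclampB, max_eq_left (by omega)]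

-- ===== VERDICT (by name: the statement is the Claim_ definition above) =====
theorem update_gem_collection_spec : Claim_equal_update_gem_collection := by
  intro old_space new_space game_board player_gems player_name _hDom hPre
  obtain ⟨hne, h0, h1, h2, h3, hndO, hndI, himp⟩ := hPre
  unfold Spec_update_gem_collection
  exact ugc_main old_space new_space game_board player_gems player_name
    hne h0 h1 h2 h3 hndO hndI himp
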